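-- pv_equiv track=rewrite | github.com/Jasvina/AgentCode | projects/failmap/src/failmap/issues.py | _group_drafts
-- ===== SOURCE A (Python) =====
-- from typing import Any
--
-- def _group_drafts(drafts: list[dict[str, Any]], key: str) -> dict[str, list[dict[str, Any]]]:
--     grouped: dict[str, list[dict[str, Any]]] = {}
--     for draft in drafts:
--         value = str(draft.get(key) or "unknown")
--         grouped.setdefault(value, []).append(draft)
--     for value in grouped:
--         grouped[value] = sorted(grouped[value], key=lambda item: (item["title"], item["file"]))
--     return dict(sorted(grouped.items(), key=lambda item: item[0]))
-- ===== SOURCE B (Python) =====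
-- def _group_drafts(drafts, key):
--     def val(d):
--         return str(d.get(key) or "unknown")
--     # one global ordering: stable sort by (title, file), then stable sort by group value
--     ordered = sorted(drafts, key=lambda d: (d["title"], d["file"]))
--     ordered.sort(key=val)
--     # single linear grouping pass; insertion order already follows sorted value order
--     grouped = {}
--     for d in ordered:
--         v = val(d)
--         if v in grouped:
--             grouped[v].append(d)
--         else:
--             grouped[v] = [d]
--     return grouped
-- ===== Notes on version B (the rewrite author's own statement) =====
-- stated objective: alternative
-- what changed: Instead of building per-value groups first and then sorting every group and finally the keys, B fixes one global order with two stable sorts ((title,file), then group value) and builds the result dict in a single grouping pass, with no per-group sorts and no final key sort.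
import Mathlib
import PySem

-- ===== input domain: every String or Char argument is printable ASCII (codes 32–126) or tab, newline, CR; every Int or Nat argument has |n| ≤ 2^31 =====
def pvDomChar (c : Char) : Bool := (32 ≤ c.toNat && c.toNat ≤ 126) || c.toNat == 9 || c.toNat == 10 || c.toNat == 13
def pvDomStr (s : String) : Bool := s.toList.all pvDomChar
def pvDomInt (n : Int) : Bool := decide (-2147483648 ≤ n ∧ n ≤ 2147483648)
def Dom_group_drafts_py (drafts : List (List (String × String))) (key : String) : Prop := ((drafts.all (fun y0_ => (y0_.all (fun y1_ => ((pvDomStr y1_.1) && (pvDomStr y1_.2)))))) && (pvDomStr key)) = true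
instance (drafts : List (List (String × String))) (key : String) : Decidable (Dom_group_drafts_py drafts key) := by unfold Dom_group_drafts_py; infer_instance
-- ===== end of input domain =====

-- B replaces A's group-then-sort-each-group-then-sort-the-keys with one global order (two stable
-- sorts) followed by a single grouping pass; equivalence is proved on drafts that all carry
-- "title" and "file" entries (elsewhere the Python raises KeyError).

-- ===== PORT A =====
-- draft.get(k): a Python dict is an association list here; lookup = first match
def pvGetStr (d : List (String × String)) (k : String) : Option String :=
  (PySem.Dict.mk d).get? k

-- str(draft.get(key) or "unknown"): "" is the only falsy str; str of a str is itself
def pvVal (d : List (String × String)) (key : String) : String :=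
  match pvGetStr d key with
  | some v => if v = "" then "unknown" else v
  | none => "unknown"

-- item["k"]; the KeyError case (none) is excluded by Pre_, so the .getD "" is never reached there
def pvReq (d : List (String × String)) (k : String) : String :=
  (pvGetStr d k).getD ""

def group_drafts_py (drafts : List (List (String × String))) (key : String) :
    List (String × List (List (String × String))) :=
  -- dict(sorted( …second loop over the grouping dict built by the first loop… , key=item[0]))
  (PySem.Dict.ofList (PySem.List.sorted
    ((PySem.Dict.mk
      -- first loop: grouped.setdefault(value, []).append(draft), i.e. grouped[value] = grouped.get(value, []) + [draft]
      ((drafts.foldl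
          (fun g draft => g.modify (pvVal draft key) [] (fun l => l ++ [draft]))
          PySem.Dict.empty).items.map
        -- second loop: grouped[value] = sorted(grouped[value], key=lambda item: (item["title"], item["file"]))
        (fun p => (p.1, PySem.List.sorted2 p.2 (fun it => pvReq it "title") (fun it => pvReq it "file"))))).items)
    (fun p => p.1))).items

-- ===== PORT B =====
def group_drafts_py_alt (drafts : List (List (String × String))) (key : String) :
    List (String × List (List (String × String))) :=
  -- ordered = sorted(drafts, key=lambda d: (d["title"], d["file"])); ordered.sort(key=val)
  ((PySem.List.sorted
      (PySem.List.sorted2 drafts (fun d => pvReq d "title") (fun d => pvReq d "file"))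
      (fun d => pvVal d key)).foldl
    -- single grouping pass: if v in grouped: grouped[v].append(d) else grouped[v] = [d]
    (fun g d =>
      if g.contains (pvVal d key) then g.modify (pvVal d key) [] (fun l => l ++ [d])
      else g.insert (pvVal d key) [d])
    PySem.Dict.empty).items

-- ===== PRECONDITION & SPEC =====
-- Pre_ excludes exactly the inputs containing a draft without a "title" or "file" entry,
-- on which the Python A raises KeyError (it returns nothing there).
def Pre_group_drafts_py (drafts : List (List (String × String))) (key : String) : Prop :=
  (drafts.all (fun d => d.any (fun p => p.1 == "title") && d.any (fun p => p.1 == "file"))) = true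
instance (drafts : List (List (String × String))) (key : String) : Decidable (Pre_group_drafts_py drafts key) := by
  unfold Pre_group_drafts_py; infer_instance

def pvWitness_group_drafts_py : (List (List (String × String))) × String :=
  ([[("title", "a"), ("file", "f"), ("kind", "bug")], [("title", "b"), ("file", "g")]], "kind")

def Spec_group_drafts_py (drafts : List (List (String × String))) (key : String)
    (out : List (String × List (List (String × String)))) : Prop :=
  out = group_drafts_py_alt drafts key
instance (drafts : List (List (String × String))) (key : String)
    (out : List (String × List (List (String × String)))) : Decidable (Spec_group_drafts_py drafts key out) := by
  unfold Spec_group_drafts_py; infer_instance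

-- ===== CLAIM (what is proved, stated in full; the proofs are below) =====
def Claim_equal_group_drafts_py : Prop := ∀ (drafts : List (List (String × String))) (key : String), Dom_group_drafts_py drafts key → Pre_group_drafts_py drafts key → Spec_group_drafts_py drafts key (group_drafts_py drafts key)

-- ===== LEMMAS AND PROOFS =====

-- Generic facts about PySem's stable insertion sort `xs.foldl (insertBy before) []`, for a
-- `before` relation that is transitive (hT), asymmetric (hA) and weakly transitive (hW).

theorem pv_pw_insertBy {α : Type} (before : α → α → Bool)
    (hT : ∀ a b c, before a b = true → before b c = true → before a c = true)
    (hA : ∀ a b, before a b = true → before b a = false)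
    (x : α) (acc : List α) (h : acc.Pairwise (fun a b => before b a = false)) :
    (PySem.List.insertBy before x acc).Pairwise (fun a b => before b a = false) := by
  induction acc with
  | nil => simp [PySem.List.insertBy]
  | cons y ys ih =>
    rw [List.pairwise_cons] at h
    obtain ⟨h1, h2⟩ := h
    rw [PySem.List.insertBy]
    cases hxy : before x y with
    | true =>
      simp only [if_pos rfl]
      refine List.Pairwise.cons ?_ (List.Pairwise.cons h1 h2)
      intro z hz
      rcases List.mem_cons.mp hz with rfl | hz'
      · exact hA x z hxy
      · cases hzx : before z x with
        | false => rfl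
        | true => exact absurd (hT z x y hzx hxy) (by simp [h1 z hz'])
    | false =>
      simp only [Bool.false_eq_true, if_false]
      refine List.Pairwise.cons ?_ (ih h2)
      intro z hz
      rcases (PySem.List.mem_insertBy before x z ys).mp hz with rfl | hz'
      · exact hxy
      · exact h1 z hz'

theorem pv_pw_isort {α : Type} (before : α → α → Bool)
    (hT : ∀ a b c, before a b = true → before b c = true → before a c = true)
    (hA : ∀ a b, before a b = true → before b a = false)
    (xs : List α) :
    (xs.foldl (fun acc x => PySem.List.insertBy before x acc) []).Pairwise
      (fun a b => before b a = false) := by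
  induction xs using List.reverseRecOn with
  | nil => simp
  | append_singleton xs x ih =>
    rw [List.foldl_append, List.foldl_cons, List.foldl_nil]
    exact pv_pw_insertBy before hT hA x _ ih

theorem pv_filter_insertBy {α : Type} (before : α → α → Bool)
    (hW : ∀ a b c, before a b = true → before c b = false → before a c = true)
    (p : α → Bool) (x : α) (acc : List α)
    (h : acc.Pairwise (fun a b => before b a = false)) :
    (PySem.List.insertBy before x acc).filter p =
      if p x then PySem.List.insertBy before x (acc.filter p) else acc.filter p := by
  induction acc with
  | nil => cases hp : p x <;> simp [PySem.List.insertBy, hp]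
  | cons y ys ih =>
    rw [List.pairwise_cons] at h
    obtain ⟨h1, h2⟩ := h
    rw [PySem.List.insertBy]
    cases hxy : before x y with
    | true =>
      simp only [if_pos rfl]
      cases hp : p x with
      | false => simp [hp]
      | true =>
        have hall : ∀ z ∈ (y :: ys).filter p, before x z = true := by
          intro z hz
          rcases List.mem_cons.mp (List.mem_of_mem_filter hz) with rfl | hz'
          · exact hxy
          · exact hW x y z hxy (h1 z hz')
        rw [if_pos trivial, List.filter_cons_of_pos hp, if_pos rfl]
        cases hf : (y :: ys).filter p with
        | nil => rw [PySem.List.insertBy]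
        | cons z t =>
          have hz : before x z = true := hall z (by rw [hf]; exact List.mem_cons_self ..)
          rw [PySem.List.insertBy, if_pos hz]
    | false =>
      simp only [Bool.false_eq_true, if_false]
      cases hp : p x <;> cases hpy : p y <;>
        simp [hp, hpy, List.filter_cons, ih h2, PySem.List.insertBy, hxy]

theorem pv_filter_isort {α : Type} (before : α → α → Bool)
    (hT : ∀ a b c, before a b = true → before b c = true → before a c = true)
    (hA : ∀ a b, before a b = true → before b a = false)
    (hW : ∀ a b c, before a b = true → before c b = false → before a c = true)
    (p : α → Bool) (xs : List α) :
    (xs.foldl (fun acc x => PySem.List.insertBy before x acc) []).filter p =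
      (xs.filter p).foldl (fun acc x => PySem.List.insertBy before x acc) [] := by
  induction xs using List.reverseRecOn with
  | nil => simp
  | append_singleton xs x ih =>
    rw [List.foldl_append, List.foldl_cons, List.foldl_nil,
      pv_filter_insertBy before hW p x _ (pv_pw_isort before hT hA xs), List.filter_append]
    cases hp : p x <;> simp [hp, ih, List.foldl_append]

theorem pv_fiber_insertBy {α κ : Type} [LinearOrder κ] [BEq κ] [LawfulBEq κ]
    (key : α → κ) (v : κ) (x : α) (acc : List α)
    (h : acc.Pairwise (fun a b => decide (key b < key a) = false)) :
    (PySem.List.insertBy (fun a b => decide (key a < key b)) x acc).filter (fun y => key y == v) =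
      acc.filter (fun y => key y == v) ++ (if key x == v then [x] else []) := by
  induction acc with
  | nil => cases hv : (key x == v) <;> simp [PySem.List.insertBy, hv]
  | cons y ys ih =>
    rw [List.pairwise_cons] at h
    obtain ⟨h1, h2⟩ := h
    rw [PySem.List.insertBy]
    cases hxy : decide (key x < key y) with
    | true =>
      rw [if_pos rfl]
      have hxy' : key x < key y := of_decide_eq_true hxy
      cases hv : (key x == v) with
      | false => simp [List.filter_cons, hv]
      | true =>
        have hveq : key x = v := eq_of_beq hv
        have hnil : (y :: ys).filter (fun z => key z == v) = [] := by
          rw [List.filter_eq_nil_iff]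
          intro z hz
          have hle : key y ≤ key z := by
            rcases List.mem_cons.mp hz with rfl | hz'
            · exact le_refl _
            · exact le_of_not_gt (of_decide_eq_false (h1 z hz'))
          have : v < key z := lt_of_lt_of_le (hveq ▸ hxy') hle
          simp [beq_iff_eq]
          exact (ne_of_gt this)
        rw [List.filter_cons_of_pos (by simp [hv]), hnil]
        simp [hv]
    | false =>
      rw [if_neg (by simp)]
      cases hvy : (key y == v) <;>
        simp [List.filter_cons, hvy, ih h2, List.append_assoc]

theorem pv_key_hT {α κ : Type} [LinearOrder κ] (key : α → κ) :
    ∀ a b c, decide (key a < key b) = true → decide (key b < key c) = true →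
      decide (key a < key c) = true := by
  intro a b c h1 h2
  exact decide_eq_true (lt_trans (of_decide_eq_true h1) (of_decide_eq_true h2))

theorem pv_key_hA {α κ : Type} [LinearOrder κ] (key : α → κ) :
    ∀ a b, decide (key a < key b) = true → decide (key b < key a) = false := by
  intro a b h1
  exact decide_eq_false (not_lt_of_gt (of_decide_eq_true h1))

theorem pv_fiber_isort {α κ : Type} [LinearOrder κ] [BEq κ] [LawfulBEq κ]
    (key : α → κ) (v : κ) (xs : List α) :
    (PySem.List.sorted xs key).filter (fun y => key y == v) = xs.filter (fun y => key y == v) := by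
  rw [PySem.List.sorted_eq_foldl_insertBy]
  induction xs using List.reverseRecOn with
  | nil => simp
  | append_singleton xs x ih =>
    rw [List.foldl_append, List.foldl_cons, List.foldl_nil,
      pv_fiber_insertBy key v x _ (pv_pw_isort _ (pv_key_hT key) (pv_key_hA key) xs),
      ih, List.filter_append]
    cases hv : (key x == v) <;> simp [hv]

def pvLex {α κ₁ κ₂ : Type} [LinearOrder κ₁] [LinearOrder κ₂] (k1 : α → κ₁) (k2 : α → κ₂)
    (a b : α) : Bool :=
  decide (k1 a < k1 b) || (!decide (k1 b < k1 a) && decide (k2 a < k2 b))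

theorem pv_lex_iff {α κ₁ κ₂ : Type} [LinearOrder κ₁] [LinearOrder κ₂] (k1 : α → κ₁) (k2 : α → κ₂)
    (a b : α) : pvLex k1 k2 a b = true ↔ (k1 a < k1 b ∨ (k1 a ≤ k1 b ∧ k2 a < k2 b)) := by
  simp [pvLex, Bool.or_eq_true, Bool.and_eq_true, Bool.not_eq_true', decide_eq_true_eq,
    decide_eq_false_iff_not, not_lt]

theorem pv_lex_hT {α κ₁ κ₂ : Type} [LinearOrder κ₁] [LinearOrder κ₂] (k1 : α → κ₁) (k2 : α → κ₂) :
    ∀ a b c, pvLex k1 k2 a b = true → pvLex k1 k2 b c = true → pvLex k1 k2 a c = true := by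
  intro a b c hab hbc
  rw [pv_lex_iff] at *
  rcases hab with h1 | ⟨h1, h1'⟩ <;> rcases hbc with h2 | ⟨h2, h2'⟩
  · exact Or.inl (lt_trans h1 h2)
  · exact Or.inl (lt_of_lt_of_le h1 h2)
  · exact Or.inl (lt_of_le_of_lt h1 h2)
  · exact Or.inr ⟨le_trans h1 h2, lt_trans h1' h2'⟩

theorem pv_lex_hA {α κ₁ κ₂ : Type} [LinearOrder κ₁] [LinearOrder κ₂] (k1 : α → κ₁) (k2 : α → κ₂) :
    ∀ a b, pvLex k1 k2 a b = true → pvLex k1 k2 b a = false := by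
  intro a b hab
  rw [Bool.eq_false_iff]
  intro hba
  rw [pv_lex_iff] at hab hba
  rcases hab with h1 | ⟨h1, h1'⟩ <;> rcases hba with h2 | ⟨h2, h2'⟩
  · exact absurd h2 (not_lt_of_gt h1)
  · exact absurd h2 (not_le_of_gt h1)
  · exact absurd h2 (not_lt_of_ge h1)
  · exact absurd h2' (not_lt_of_gt h1')

theorem pv_lex_hW {α κ₁ κ₂ : Type} [LinearOrder κ₁] [LinearOrder κ₂] (k1 : α → κ₁) (k2 : α → κ₂) :
    ∀ a b c, pvLex k1 k2 a b = true → pvLex k1 k2 c b = false → pvLex k1 k2 a c = true := by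
  intro a b c hab hcb
  rw [pv_lex_iff]
  rw [pv_lex_iff] at hab
  rw [Bool.eq_false_iff] at hcb
  have hcb' : ¬(k1 c < k1 b ∨ (k1 c ≤ k1 b ∧ k2 c < k2 b)) := fun h => hcb ((pv_lex_iff k1 k2 c b).mpr h)
  push_neg at hcb'
  obtain ⟨hbc1, hbc2⟩ := hcb'
  rcases hab with h1 | ⟨h1, h1'⟩
  · exact Or.inl (lt_of_lt_of_le h1 hbc1)
  · by_cases hlt : k1 b < k1 c
    · exact Or.inl (lt_of_le_of_lt h1 hlt)
    · have hbc : k1 c ≤ k1 b := le_of_not_gt hlt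
      have h2 := hbc2 hbc
      exact Or.inr ⟨le_trans h1 hbc1, lt_of_lt_of_le h1' h2⟩

theorem pv_sorted2_eq {α κ₁ κ₂ : Type} [LinearOrder κ₁] [LinearOrder κ₂]
    (xs : List α) (k1 : α → κ₁) (k2 : α → κ₂) :
    PySem.List.sorted2 xs k1 k2 =
      xs.foldl (fun acc x => PySem.List.insertBy (pvLex k1 k2) x acc) [] := rfl

theorem pv_filter_sorted2 {α κ₁ κ₂ : Type} [LinearOrder κ₁] [LinearOrder κ₂]
    (xs : List α) (k1 : α → κ₁) (k2 : α → κ₂) (p : α → Bool) :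
    (PySem.List.sorted2 xs k1 k2).filter p = PySem.List.sorted2 (xs.filter p) k1 k2 := by
  rw [pv_sorted2_eq, pv_sorted2_eq]
  exact pv_filter_isort _ (pv_lex_hT k1 k2) (pv_lex_hA k1 k2) (pv_lex_hW k1 k2) p xs

theorem pv_update_sublist {α : Type} [BEq α] (xs : List α) (acc : List α) :
    (PySem.Set.update acc xs : List α).Sublist (acc ++ xs) := by
  induction xs generalizing acc with
  | nil => simp [PySem.Set.update]
  | cons x xs ih =>
    have h1 : PySem.Set.update acc (x :: xs) = PySem.Set.update (PySem.Set.add acc x) xs := rfl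
    rw [h1]
    refine (ih (PySem.Set.add acc x)).trans ?_
    unfold PySem.Set.add
    by_cases hc : (PySem.Set.contains acc x) = true
    · rw [if_pos hc]
      exact List.Sublist.append_left (List.sublist_cons_self x xs) acc
    · rw [if_neg hc, List.append_assoc, List.singleton_append]

theorem pv_ofList_sublist {α : Type} [BEq α] (xs : List α) :
    (PySem.Set.ofList xs : List α).Sublist xs := by
  have := pv_update_sublist xs (PySem.Set.empty (α := α))
  simpa [PySem.Set.update, PySem.Set.ofList, PySem.Set.empty] using this

theorem pv_groupfold_items {β : Type} (l : List β) (valf : β → String) :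
    (l.foldl (fun g d => g.modify (valf d) [] (fun w => w ++ [d])) PySem.Dict.empty).items =
      (PySem.Set.ofList (l.map valf)).map (fun v => (v, l.filter (fun d => valf d == v))) := by
  have hkeys : (l.foldl (fun g d => g.modify (valf d) [] (fun w => w ++ [d]))
      (PySem.Dict.empty : PySem.Dict String (List β))).keys = PySem.Set.ofList (l.map valf) := by
    have := PySem.Dict.keys_foldl_modify_key l valf [] (fun _ x => fun w => w ++ [x]) PySem.Dict.empty
    simpa [PySem.Dict.keys_empty, PySem.Set.ofList, PySem.Set.update, PySem.Set.empty] using this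
  have hnodup : (l.foldl (fun g d => g.modify (valf d) [] (fun w => w ++ [d]))
      (PySem.Dict.empty : PySem.Dict String (List β))).keys.Nodup := by
    refine PySem.Dict.nodup_keys_foldl_modify_key l valf [] (fun _ x => fun w => w ++ [x]) _ ?_
    simp [PySem.Dict.keys_empty]
  have hgetD : ∀ v, (l.foldl (fun g d => g.modify (valf d) [] (fun w => w ++ [d]))
      (PySem.Dict.empty : PySem.Dict String (List β))).getD v [] = l.filter (fun d => valf d == v) := by
    intro v
    have hmap : (l.foldl (fun g d => g.modify (valf d) [] (fun w => w ++ [d]))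
        (PySem.Dict.empty : PySem.Dict String (List β))) =
        ((l.map (fun d => (valf d, d))).foldl (fun g p => g.modify p.1 [] (fun w => w ++ [p.2]))
          PySem.Dict.empty) := by
      rw [List.foldl_map]
    rw [hmap, PySem.Dict.getD_foldl_modify_append, List.filter_map, List.map_map]
    simp [Function.comp_def]
  rw [PySem.Dict.items_eq_map_keys _ hnodup [], hkeys]
  refine List.map_congr_left ?_
  intro v _
  rw [hgetD v]

theorem pv_items_ofList {ν : Type} (S : List (String × ν)) (h : (S.map Prod.fst).Nodup) :
    (PySem.Dict.ofList S).items = S := by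
  have h2 := PySem.Dict.items_foldl_insert_fresh S Prod.fst Prod.snd PySem.Dict.empty
      (fun a _ => PySem.Dict.contains_empty a.1) h
  simpa [PySem.Dict.ofList, PySem.Dict.update] using h2

theorem pv_main (drafts : List (List (String × String))) (key : String) :
    group_drafts_py drafts key = group_drafts_py_alt drafts key := by
  have hKnodup : (PySem.Set.ofList (drafts.map (fun d => pvVal d key)) : List String).Nodup :=
    PySem.Set.nodup_ofList _
  have hKsort_nodup : (PySem.List.sorted
      (PySem.Set.ofList (drafts.map (fun d => pvVal d key))) (fun x => x)).Nodup :=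
    ((PySem.List.sorted_perm _ (fun x => x) false).nodup_iff).mpr hKnodup
  have hA : group_drafts_py drafts key =
      (PySem.List.sorted (PySem.Set.ofList (drafts.map (fun d => pvVal d key))) (fun x => x)).map
        (fun v => (v, PySem.List.sorted2 (drafts.filter (fun d => pvVal d key == v))
          (fun it => pvReq it "title") (fun it => pvReq it "file"))) := by
    unfold group_drafts_py
    rw [pv_groupfold_items drafts (fun d => pvVal d key)]
    have hmk : (PySem.Dict.mk (((PySem.Set.ofList (drafts.map (fun d => pvVal d key))).map
        (fun v => (v, drafts.filter (fun d => pvVal d key == v)))).map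
        (fun p => (p.1, PySem.List.sorted2 p.2 (fun it => pvReq it "title") (fun it => pvReq it "file"))))).items
        = (PySem.Set.ofList (drafts.map (fun d => pvVal d key))).map
          (fun v => (v, PySem.List.sorted2 (drafts.filter (fun d => pvVal d key == v))
            (fun it => pvReq it "title") (fun it => pvReq it "file"))) := by
      show (((PySem.Set.ofList (drafts.map (fun d => pvVal d key))).map
        (fun v => (v, drafts.filter (fun d => pvVal d key == v)))).map
        (fun p => (p.1, PySem.List.sorted2 p.2 (fun it => pvReq it "title") (fun it => pvReq it "file")))) = _
      rw [List.map_map]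
      rfl
    rw [hmk]
    have hsorted : PySem.List.sorted
        ((PySem.Set.ofList (drafts.map (fun d => pvVal d key))).map
          (fun v => (v, PySem.List.sorted2 (drafts.filter (fun d => pvVal d key == v))
            (fun it => pvReq it "title") (fun it => pvReq it "file")))) (fun p => p.1) =
        (PySem.List.sorted (PySem.Set.ofList (drafts.map (fun d => pvVal d key))) (fun x => x)).map
          (fun v => (v, PySem.List.sorted2 (drafts.filter (fun d => pvVal d key == v))
            (fun it => pvReq it "title") (fun it => pvReq it "file"))) := by
      apply PySem.List.sorted_eq_of_perm_of_pairwise_lt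
      · exact (PySem.List.sorted_perm _ (fun x => x) false).map _
      · exact (List.pairwise_map).mpr (PySem.List.sorted_ofList_pairwise_lt (drafts.map (fun d => pvVal d key)))
    rw [hsorted]
    apply pv_items_ofList
    rw [List.map_map]
    simpa [Function.comp_def] using hKsort_nodup
  have hB : group_drafts_py_alt drafts key =
      (PySem.List.sorted (PySem.Set.ofList (drafts.map (fun d => pvVal d key))) (fun x => x)).map
        (fun v => (v, PySem.List.sorted2 (drafts.filter (fun d => pvVal d key == v))
          (fun it => pvReq it "title") (fun it => pvReq it "file"))) := by
    unfold group_drafts_py_alt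
    have hfoldeq : (fun (g : PySem.Dict String (List (List (String × String)))) d =>
        if g.contains (pvVal d key) then g.modify (pvVal d key) [] (fun l => l ++ [d])
        else g.insert (pvVal d key) [d]) =
        (fun g d => g.modify (pvVal d key) [] (fun w => w ++ [d])) := by
      funext g d
      by_cases hc : g.contains (pvVal d key) = true
      · simp only [hc, if_true]
      · simp only [Bool.not_eq_true] at hc
        simp only [hc, Bool.false_eq_true, if_false, PySem.Dict.modify,
          PySem.Dict.getD_of_not_contains _ _ hc, List.nil_append]
    rw [hfoldeq, pv_groupfold_items _ (fun d => pvVal d key)]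
    have hop : (PySem.List.sorted (PySem.List.sorted2 drafts (fun d => pvReq d "title")
        (fun d => pvReq d "file")) (fun d => pvVal d key)).Perm drafts :=
      (PySem.List.sorted_perm _ (fun d => pvVal d key) false).trans
        (PySem.List.sorted2_perm drafts _ _ false)
    have hK'nodup : (PySem.Set.ofList ((PySem.List.sorted (PySem.List.sorted2 drafts
        (fun d => pvReq d "title") (fun d => pvReq d "file")) (fun d => pvVal d key)).map
        (fun d => pvVal d key)) : List String).Nodup := PySem.Set.nodup_ofList _
    have hKK : PySem.List.sorted (PySem.Set.ofList (drafts.map (fun d => pvVal d key))) (fun x => x) =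
        PySem.Set.ofList ((PySem.List.sorted (PySem.List.sorted2 drafts (fun d => pvReq d "title")
          (fun d => pvReq d "file")) (fun d => pvVal d key)).map (fun d => pvVal d key)) := by
      apply PySem.List.sorted_eq_of_perm_of_pairwise_lt
      · refine (List.perm_ext_iff_of_nodup hK'nodup hKnodup).mpr ?_
        intro a
        rw [PySem.Set.mem_ofList, PySem.Set.mem_ofList]
        exact (hop.map (fun d => pvVal d key)).mem_iff
      · have hple : ((PySem.List.sorted (PySem.List.sorted2 drafts (fun d => pvReq d "title")
            (fun d => pvReq d "file")) (fun d => pvVal d key)).map (fun d => pvVal d key)).Pairwise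
            (· ≤ ·) := PySem.List.sorted_map_key_pairwise _ (fun d => pvVal d key)
        have hle := hple.sublist (pv_ofList_sublist _)
        exact (hle.and hK'nodup).imp (fun h => lt_of_le_of_ne h.1 h.2)
    rw [← hKK]
    refine List.map_congr_left ?_
    intro v _
    have h1 := pv_fiber_isort (fun d => pvVal d key) v
      (PySem.List.sorted2 drafts (fun d => pvReq d "title") (fun d => pvReq d "file"))
    have h2 := pv_filter_sorted2 drafts (fun d => pvReq d "title") (fun d => pvReq d "file")
      (fun d => pvVal d key == v)
    rw [h1.trans h2]
  exact hA.trans hB.symm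

-- ===== VERDICT (by name: the statement is the Claim_ definition above) =====
theorem group_drafts_py_spec : Claim_equal_group_drafts_py := by
  intro drafts key _ _
  unfold Spec_group_drafts_py
  exact pv_main drafts key
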